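-- pv_equiv track=rewrite | github.com/0xTCG/aldy | aldy/indelpost/alleles.py | search_nearest_lt_locus
-- ===== SOURCE A (Python) =====
-- def search_nearest_lt_locus(indexed_contig, pos, left=True):
--     if left:
--         not_found = True
--     else:
--         not_found = False if indexed_contig.get(pos, None) else True
--
--     while not_found:
--         pos -= 1
--
--         if indexed_contig.get(pos, False):
--             not_found = False
--             alleles = indexed_contig[pos]
--             ref, alt = alleles[0], alleles[1]
--
--             # when deletion is involved
--             if len(ref) > 1:
--                 pos += len(ref)
--
--     return pos
-- ===== SOURCE B (Python) =====
-- def search_nearest_lt_locus(indexed_contig, pos, left=True):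
--     if not left and indexed_contig.get(pos):
--         return pos
--     best = max(k for k, v in indexed_contig.items() if k < pos and v)
--     ref = indexed_contig[best][0]
--     return best + len(ref) if len(ref) > 1 else best
-- ===== Notes on version B (the rewrite author's own statement) =====
-- stated objective: alternative
-- what changed: Replaces A's step-by-step downward probing loop (pos -= 1 until a non-empty entry is hit) with a single max() scan over the dict's items to find the greatest non-empty key below pos, followed by one lookup for the deletion adjustment.
import Mathlib
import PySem

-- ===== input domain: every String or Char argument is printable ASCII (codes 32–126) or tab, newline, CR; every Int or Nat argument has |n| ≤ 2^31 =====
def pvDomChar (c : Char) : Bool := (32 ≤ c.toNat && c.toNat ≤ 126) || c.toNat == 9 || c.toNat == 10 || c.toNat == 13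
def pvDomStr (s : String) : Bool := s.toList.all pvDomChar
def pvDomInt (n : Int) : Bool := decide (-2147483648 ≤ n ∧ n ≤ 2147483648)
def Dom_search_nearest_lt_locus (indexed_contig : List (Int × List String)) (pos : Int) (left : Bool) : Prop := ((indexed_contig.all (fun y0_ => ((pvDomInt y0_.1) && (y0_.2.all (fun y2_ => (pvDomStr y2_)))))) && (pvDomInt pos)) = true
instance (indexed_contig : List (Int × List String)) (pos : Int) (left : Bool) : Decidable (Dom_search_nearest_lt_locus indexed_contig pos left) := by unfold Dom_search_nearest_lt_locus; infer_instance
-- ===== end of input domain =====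

-- B replaces A's step-by-step downward probing loop ('pos -= 1' until a truthy key is hit)
-- by a single max-scan over the dict's items (objective: alternative; return value only, no mutation).

-- ===== PORT A =====

-- `indexed_contig.get(pos, …)` (dict lookup; the assoc list read as a dict, first match)
def pvLookup (d : List (Int × List String)) (k : Int) : Option (List String) :=
  (PySem.Dict.mk d).get? k

-- truthiness of `indexed_contig.get(pos, False)` / `.get(pos, None)`: a present, non-empty list
def pvTruthy (d : List (Int × List String)) (k : Int) : Bool :=
  match pvLookup d k with
  | some v => !v.isEmpty
  | none => false

-- A's `while not_found:` loop; fuel bounds the number of `pos -= 1` steps (the loop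
-- diverges in Python when no truthy key lies below pos — excluded by Pre_)
def pvLoopA (d : List (Int × List String)) : Nat → Int → Int
  | 0, pos => pos
  | fuel+1, pos =>
    let pos' := pos - 1
    if pvTruthy d pos' then
      match pvLookup d pos' with
      | some (ref :: _ :: _) =>      -- `ref, alt = alleles[0], alleles[1]`
          if 1 < PySem.Str.len ref then pos' + PySem.Str.len ref else pos'
      | _ => pos'                    -- Python raises IndexError here (alleles[1]); outside Pre_
    else pvLoopA d fuel pos'

def search_nearest_lt_locus (indexed_contig : List (Int × List String)) (pos : Int) (left : Bool) : Int :=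
  let not_found := if left then true else !pvTruthy indexed_contig pos
  if not_found then
    pvLoopA indexed_contig
      ((pos - (indexed_contig.map Prod.fst).foldl min pos).toNat + 1) pos
  else pos

-- ===== PORT B =====
def search_nearest_lt_locus_alt (indexed_contig : List (Int × List String)) (pos : Int) (left : Bool) : Int :=
  if !left && pvTruthy indexed_contig pos then pos
  else
    match PySem.List.max?
        ((indexed_contig.filter (fun kv => decide (kv.1 < pos) && !kv.2.isEmpty)).map Prod.fst)
        (fun k => k) with
    | some best =>
        match pvLookup indexed_contig best with
        | some (ref :: _) =>
            if 1 < PySem.Str.len ref then best + PySem.Str.len ref else best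
        | _ => 0                     -- unreachable: best came from a non-empty entry
    | none => 0                      -- Python B raises ValueError (max of empty); outside Pre_

-- ===== PRECONDITION & SPEC =====
-- Pre_ requires unique keys (a duplicate-key assoc list encodes no Python dict) and excludes
-- the inputs on which A returns no value: A diverges when no non-empty entry lies below pos,
-- and raises IndexError when the nearest non-empty entry below pos has fewer than two alleles.
def Pre_search_nearest_lt_locus (indexed_contig : List (Int × List String)) (pos : Int) (left : Bool) : Prop :=
  (indexed_contig.map Prod.fst).Nodup ∧
  ((left = false ∧ pvTruthy indexed_contig pos = true) ∨
   ∃ kv ∈ indexed_contig, kv.1 < pos ∧ 2 ≤ kv.2.length ∧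
     ∀ kv' ∈ indexed_contig, kv'.1 < pos → kv'.2 ≠ [] → kv'.1 ≤ kv.1)
instance (indexed_contig : List (Int × List String)) (pos : Int) (left : Bool) : Decidable (Pre_search_nearest_lt_locus indexed_contig pos left) := by unfold Pre_search_nearest_lt_locus; infer_instance

def pvWitness_search_nearest_lt_locus : (List (Int × List String)) × Int × Bool :=
  ([(3, ["AC", "A"])], 5, true)

def Spec_search_nearest_lt_locus (indexed_contig : List (Int × List String)) (pos : Int) (left : Bool) (out : Int) : Prop := out = search_nearest_lt_locus_alt indexed_contig pos left
instance (indexed_contig : List (Int × List String)) (pos : Int) (left : Bool) (out : Int) : Decidable (Spec_search_nearest_lt_locus indexed_contig pos left out) := by unfold Spec_search_nearest_lt_locus; infer_instance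

-- ===== CLAIM (what is proved, stated in full; the proofs are below) =====
def Claim_equal_search_nearest_lt_locus : Prop := ∀ (indexed_contig : List (Int × List String)) (pos : Int) (left : Bool), Dom_search_nearest_lt_locus indexed_contig pos left → Pre_search_nearest_lt_locus indexed_contig pos left → Spec_search_nearest_lt_locus indexed_contig pos left (search_nearest_lt_locus indexed_contig pos left)

-- ===== LEMMAS AND PROOFS =====

-- membership ↔ dict lookup, under unique keys
lemma pvLookup_of_mem {d : List (Int × List String)} {kv : Int × List String}
    (hnd : (d.map Prod.fst).Nodup) (hm : kv ∈ d) : pvLookup d kv.1 = some kv.2 := by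
  exact PySem.Dict.get?_of_mem_items (d := PySem.Dict.mk d) hm hnd

lemma mem_of_pvLookup {d : List (Int × List String)} {k : Int} {v : List String}
    (h : pvLookup d k = some v) : (k, v) ∈ d :=
  PySem.Dict.mem_items_of_get?_eq_some (d := PySem.Dict.mk d) h

-- A's probing loop, given enough fuel, lands exactly on the greatest truthy key K below pos
lemma pvLoopA_eq (d : List (Int × List String)) (K : Int) (hK : pvTruthy d K = true) :
    ∀ (fuel : Nat) (pos : Int), K < pos → (pos - K).toNat ≤ fuel →
      (∀ j, K < j → j < pos → pvTruthy d j = false) →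
      pvLoopA d fuel pos =
        (match pvLookup d K with
         | some (ref :: _ :: _) =>
             if 1 < PySem.Str.len ref then K + PySem.Str.len ref else K
         | _ => K) := by
  intro fuel
  induction fuel with
  | zero => intro pos hlt hfuel _; omega
  | succ n ih =>
    intro pos hlt hfuel hgap
    by_cases h : K = pos - 1
    · subst h
      simp [pvLoopA, hK]
    · have h1 : K < pos - 1 := by omega
      have h2 : pvTruthy d (pos - 1) = false := hgap _ h1 (by omega)
      simp only [pvLoopA, h2, if_neg, Bool.false_eq_true, not_false_eq_true]
      exact ih (pos - 1) h1 (by omega) (fun j hj1 hj2 => hgap j hj1 (by omega))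

-- each Pre_-maximal qualifying key is truthy
lemma pvTruthy_of_entry {d : List (Int × List String)} {kv : Int × List String}
    (hnd : (d.map Prod.fst).Nodup) (hm : kv ∈ d) (hne : kv.2 ≠ []) :
    pvTruthy d kv.1 = true := by
  simp [pvTruthy, pvLookup_of_mem hnd hm, hne]

-- B's candidate list contains exactly the qualifying keys
lemma mem_cands {d : List (Int × List String)} {pos j : Int} :
    j ∈ (d.filter (fun kv => decide (kv.1 < pos) && !kv.2.isEmpty)).map Prod.fst ↔
      ∃ v, (j, v) ∈ d ∧ j < pos ∧ v ≠ [] := by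
  simp only [List.mem_map, List.mem_filter]
  constructor
  · rintro ⟨⟨k, v⟩, ⟨hm, hf⟩, rfl⟩
    refine ⟨v, hm, ?_, ?_⟩ <;> simp_all
  · rintro ⟨v, hm, hlt, hne⟩
    exact ⟨(j, v), ⟨hm, by simp [hlt, hne]⟩, rfl⟩

-- the core agreement: in the searching case both ports return the adjusted greatest key
lemma search_agree {d : List (Int × List String)} {pos : Int}
    (hnd : (d.map Prod.fst).Nodup)
    (hex : ∃ kv ∈ d, kv.1 < pos ∧ 2 ≤ kv.2.length ∧
      ∀ kv' ∈ d, kv'.1 < pos → kv'.2 ≠ [] → kv'.1 ≤ kv.1) :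
    pvLoopA d ((pos - (d.map Prod.fst).foldl min pos).toNat + 1) pos =
      (match PySem.List.max?
          ((d.filter (fun kv => decide (kv.1 < pos) && !kv.2.isEmpty)).map Prod.fst)
          (fun k => k) with
       | some best =>
           match pvLookup d best with
           | some (ref :: _) =>
               if 1 < PySem.Str.len ref then best + PySem.Str.len ref else best
           | _ => 0
       | none => 0) := by
  obtain ⟨⟨K, v⟩, hm, hlt, hlen, hmax⟩ := hex
  obtain ⟨r, a, t, rfl⟩ : ∃ r a t, v = r :: a :: t := by
    match v, hlen with
    | r :: a :: t, _ => exact ⟨r, a, t, rfl⟩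
  have hvne : (r :: a :: t) ≠ ([] : List String) := by simp
  have hKt : pvTruthy d K = true := pvTruthy_of_entry hnd hm hvne
  have hget : pvLookup d K = some (r :: a :: t) := pvLookup_of_mem hnd hm
  -- A side
  have hmmin : (d.map Prod.fst).foldl min pos ≤ K :=
    (PySem.List.foldl_min_le (d.map Prod.fst) pos).2 K (by
      exact List.mem_map_of_mem hm)
  have hA : pvLoopA d ((pos - (d.map Prod.fst).foldl min pos).toNat + 1) pos =
      (if 1 < PySem.Str.len r then K + PySem.Str.len r else K) := by
    rw [pvLoopA_eq d K hKt _ pos hlt (by omega)]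
    · simp [hget]
    · intro j hj1 hj2
      by_contra hc
      have hc' : pvTruthy d j = true := by
        cases h : pvTruthy d j with
        | false => exact absurd h hc
        | true => rfl
      unfold pvTruthy at hc'
      rcases hgj : pvLookup d j with _ | w
      · rw [hgj] at hc'; simp at hc'
      · rw [hgj] at hc'
        have hw : w ≠ [] := by
          intro hnil; subst hnil; simp at hc'
        have := hmax (j, w) (mem_of_pvLookup hgj) hj2 hw
        omega
  -- B side
  set cands := (d.filter (fun kv => decide (kv.1 < pos) && !kv.2.isEmpty)).map Prod.fst with hc
  have hKc : K ∈ cands := by rw [hc, mem_cands]; exact ⟨_, hm, hlt, hvne⟩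
  have hne : cands ≠ [] := fun h => by simp [h] at hKc
  rcases hmx : PySem.List.max? cands (fun k => k) with _ | m
  · rw [PySem.List.max?_eq_none_iff] at hmx
    exact absurd hmx hne
  · have hmm : m ∈ cands := PySem.List.max?_mem hmx
    obtain ⟨w, hwm, hwlt, hwne⟩ := mem_cands.mp (hc ▸ hmm)
    have h1 : m ≤ K := hmax (m, w) hwm hwlt hwne
    have h2 : K ≤ m := PySem.List.max?_isMax hmx K hKc
    have hKm : m = K := le_antisymm h1 h2
    subst hKm
    rw [hA]
    simp [hget]

-- ===== VERDICT (by name: the statement is the Claim_ definition above) =====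
theorem search_nearest_lt_locus_spec : Claim_equal_search_nearest_lt_locus := by
  intro d pos left _ hpre
  obtain ⟨hnd, hcase⟩ := hpre
  unfold Spec_search_nearest_lt_locus search_nearest_lt_locus search_nearest_lt_locus_alt
  cases left with
  | true =>
    have hex : ∃ kv ∈ d, kv.1 < pos ∧ 2 ≤ kv.2.length ∧
        ∀ kv' ∈ d, kv'.1 < pos → kv'.2 ≠ [] → kv'.1 ≤ kv.1 := by
      rcases hcase with ⟨hl, _⟩ | h
      · exact absurd hl (by simp)
      · exact h
    simpa using search_agree hnd hex
  | false =>
    cases ht : pvTruthy d pos with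
    | true => simp
    | false =>
      have hex : ∃ kv ∈ d, kv.1 < pos ∧ 2 ≤ kv.2.length ∧
          ∀ kv' ∈ d, kv'.1 < pos → kv'.2 ≠ [] → kv'.1 ≤ kv.1 := by
        rcases hcase with ⟨_, ht'⟩ | h
        · rw [ht] at ht'; exact absurd ht' (by simp)
        · exact h
      simpa [ht] using search_agree hnd hex
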